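-- pv_equiv track=rewrite | github.com/aytzey/KiCAD-MCP-Server | python/kicad_interface.py | _cluster_rules_applied
-- ===== SOURCE A (Python) =====
-- from typing import Any, Dict, List, Optional, Set, Tuple
--
-- def _cluster_rules_applied(
--
--     anchor: Optional[Dict[str, Any]],
--     members: List[Dict[str, Any]],
--     signal_profile: str,
-- ) -> List[str]:
--     rules = ["cluster_by_connectivity", "keep_anchor_locality"]
--     if anchor and anchor.get("role") == "connector":
--         rules.append("connectors_on_edge")
--     if any(member.get("role") == "decoupling" for member in members):
--         rules.append("decoupling_close_to_anchor")
--     if signal_profile in {"high_speed", "rf"}: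
--         rules.append("reserve_breakout_corridor")
--     if signal_profile == "analog":
--         rules.append("keep_analog_cluster_quiet")
--     if signal_profile in {"power", "power_switching"}:
--         rules.append("bias_power_cluster_away_from_sensitive_edges")
--     return rules
-- ===== SOURCE B (Python) =====
-- from typing import Any, Dict, List, Optional
--
-- # Ordered catalogue of all placement rules, each keyed by the condition that enables it.
-- _RULEBOOK = [
--     ("cluster_by_connectivity", "always"),
--     ("keep_anchor_locality", "always"),
--     ("connectors_on_edge", "anchor_connector"),
--     ("decoupling_close_to_anchor", "has_decoupling"),
--     ("reserve_breakout_corridor", "fast_profile"),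
--     ("keep_analog_cluster_quiet", "analog_profile"),
--     ("bias_power_cluster_away_from_sensitive_edges", "power_profile"),
-- ]
--
-- def _cluster_rules_applied(
--     anchor: Optional[Dict[str, Any]],
--     members: List[Dict[str, Any]],
--     signal_profile: str,
-- ) -> List[str]:
--     holds = {
--         "always": True,
--         "anchor_connector": bool(anchor) and anchor.get("role") == "connector",
--         "has_decoupling": any(m.get("role") == "decoupling" for m in members),
--         "fast_profile": signal_profile in ("high_speed", "rf"),
--         "analog_profile": signal_profile == "analog",
--         "power_profile": signal_profile in ("power", "power_switching"),
--     }
--     return [rule for rule, tag in _RULEBOOK if holds[tag]]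
-- ===== Notes on version B (the rewrite author's own statement) =====
-- stated objective: alternative
-- what changed: Inverts the control flow: instead of A's chain of five append-if statements building the list imperatively, B keeps a static ordered rulebook of (rule, condition-tag) pairs and produces the result as one filter pass over the catalogue against a tag-to-truth table evaluated once.
import Mathlib
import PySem

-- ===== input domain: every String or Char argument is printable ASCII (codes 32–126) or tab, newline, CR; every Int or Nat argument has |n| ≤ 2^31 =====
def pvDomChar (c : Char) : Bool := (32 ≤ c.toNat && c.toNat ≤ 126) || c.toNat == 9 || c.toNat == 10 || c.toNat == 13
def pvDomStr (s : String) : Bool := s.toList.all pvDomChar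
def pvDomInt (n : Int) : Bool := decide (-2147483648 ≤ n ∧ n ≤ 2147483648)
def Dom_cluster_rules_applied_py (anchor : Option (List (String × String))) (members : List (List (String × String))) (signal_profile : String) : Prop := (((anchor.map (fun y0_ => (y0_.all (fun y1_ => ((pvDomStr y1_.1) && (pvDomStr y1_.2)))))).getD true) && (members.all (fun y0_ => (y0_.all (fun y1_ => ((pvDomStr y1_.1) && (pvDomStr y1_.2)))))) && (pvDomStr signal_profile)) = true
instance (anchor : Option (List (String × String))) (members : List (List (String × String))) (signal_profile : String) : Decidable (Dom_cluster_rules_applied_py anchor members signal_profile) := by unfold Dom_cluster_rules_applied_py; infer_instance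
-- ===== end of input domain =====

-- B inverts A's control flow: instead of five sequential append-if statements, it
-- filters a static ordered rulebook of (rule, condition-tag) pairs against a
-- tag→truth table evaluated once (objective: alternative).

-- ===== PORT A =====
-- dict.get("role") on the assoc-list representation = first match (List.lookup)
def cluster_rules_applied_py (anchor : Option (List (String × String))) (members : List (List (String × String))) (signal_profile : String) : List String :=
  let rules := ["cluster_by_connectivity", "keep_anchor_locality"]
  let rules := if (match anchor with
                   | none => false
                   | some d => !d.isEmpty && (d.lookup "role" == some "connector"))
               then rules ++ ["connectors_on_edge"] else rules
  let rules := if members.any (fun m => m.lookup "role" == some "decoupling")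
               then rules ++ ["decoupling_close_to_anchor"] else rules
  let rules := if signal_profile == "high_speed" || signal_profile == "rf"
               then rules ++ ["reserve_breakout_corridor"] else rules
  let rules := if signal_profile == "analog"
               then rules ++ ["keep_analog_cluster_quiet"] else rules
  let rules := if signal_profile == "power" || signal_profile == "power_switching"
               then rules ++ ["bias_power_cluster_away_from_sensitive_edges"] else rules
  rules

-- ===== PORT B =====
def pvRulebook : List (String × String) :=
  [("cluster_by_connectivity", "always"),
   ("keep_anchor_locality", "always"),
   ("connectors_on_edge", "anchor_connector"),
   ("decoupling_close_to_anchor", "has_decoupling"),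
   ("reserve_breakout_corridor", "fast_profile"),
   ("keep_analog_cluster_quiet", "analog_profile"),
   ("bias_power_cluster_away_from_sensitive_edges", "power_profile")]

-- holds[tag] in Python: every tag of the rulebook is a key of the dict, so the
-- lookup never raises; (get? …).getD false is exact on those keys.
def cluster_rules_applied_py_alt (anchor : Option (List (String × String))) (members : List (List (String × String))) (signal_profile : String) : List String :=
  let holds : PySem.Dict String Bool := PySem.Dict.mk
    [("always", true),
     ("anchor_connector",
       match anchor with
       | none => false
       | some d => !d.isEmpty && (d.lookup "role" == some "connector")),
     ("has_decoupling", members.any (fun m => m.lookup "role" == some "decoupling")),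
     ("fast_profile", signal_profile == "high_speed" || signal_profile == "rf"),
     ("analog_profile", signal_profile == "analog"),
     ("power_profile", signal_profile == "power" || signal_profile == "power_switching")]
  (pvRulebook.filter (fun p => (holds.get? p.2).getD false)).map (·.1)

-- ===== PRECONDITION & SPEC =====
def Spec_cluster_rules_applied_py (anchor : Option (List (String × String))) (members : List (List (String × String))) (signal_profile : String) (out : List String) : Prop := out = cluster_rules_applied_py_alt anchor members signal_profile
instance (anchor : Option (List (String × String))) (members : List (List (String × String))) (signal_profile : String) (out : List String) : Decidable (Spec_cluster_rules_applied_py anchor members signal_profile out) := by unfold Spec_cluster_rules_applied_py; infer_instance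

-- ===== CLAIM (what is proved, stated in full; the proofs are below) =====
def Claim_equal_cluster_rules_applied_py : Prop := ∀ (anchor : Option (List (String × String))) (members : List (List (String × String))) (signal_profile : String), Dom_cluster_rules_applied_py anchor members signal_profile → Spec_cluster_rules_applied_py anchor members signal_profile (cluster_rules_applied_py anchor members signal_profile)

-- ===== LEMMAS AND PROOFS =====
-- Both sides, abstracted over the two structural conditions b1, b2 and the profile string.
theorem tableEq (b1 b2 : Bool) (s : String) :
    (let r := ["cluster_by_connectivity", "keep_anchor_locality"]
     let r := if b1 then r ++ ["connectors_on_edge"] else r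
     let r := if b2 then r ++ ["decoupling_close_to_anchor"] else r
     let r := if s == "high_speed" || s == "rf" then r ++ ["reserve_breakout_corridor"] else r
     let r := if s == "analog" then r ++ ["keep_analog_cluster_quiet"] else r
     if s == "power" || s == "power_switching" then r ++ ["bias_power_cluster_away_from_sensitive_edges"] else r)
    =
    (let holds : PySem.Dict String Bool := PySem.Dict.mk
       [("always", true), ("anchor_connector", b1), ("has_decoupling", b2),
        ("fast_profile", s == "high_speed" || s == "rf"),
        ("analog_profile", s == "analog"),
        ("power_profile", s == "power" || s == "power_switching")]
     (pvRulebook.filter (fun p => (holds.get? p.2).getD false)).map (·.1)) := by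
  cases b1 <;> cases b2 <;>
  cases hg1 : s == "high_speed" <;>
  cases hg2 : s == "rf" <;>
  cases hg3 : s == "analog" <;>
  cases hg4 : s == "power" <;>
  cases hg5 : s == "power_switching" <;>
  simp only [hg1, hg2, hg3, hg4, hg5] <;>
  simp [pvRulebook, PySem.Dict.get?, List.filter]

theorem cluster_rules_applied_eq (anchor : Option (List (String × String))) (members : List (List (String × String))) (signal_profile : String) :
    cluster_rules_applied_py anchor members signal_profile = cluster_rules_applied_py_alt anchor members signal_profile := by
  unfold cluster_rules_applied_py cluster_rules_applied_py_alt
  exact tableEq _ _ _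

-- ===== VERDICT (by name: the statement is the Claim_ definition above) =====
theorem cluster_rules_applied_py_spec : Claim_equal_cluster_rules_applied_py := by
  intro anchor members signal_profile _
  exact cluster_rules_applied_eq anchor members signal_profile
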